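-- pv_equiv track=rewrite | github.com/Payvo-ai/payvo-middleware | payvo-middleware/app/services/fingerprint_service.py | _analyze_frequency_bands
-- ===== SOURCE A (Python) =====
-- from typing import Dict, List, Optional, Any, Tuple
--
-- def _analyze_frequency_bands(frequencies: List[int]) -> Dict[str, int]:
--     """Analyze WiFi frequency band distribution"""
--     bands = {'2.4GHz': 0, '5GHz': 0, 'other': 0}
--
--     for freq in frequencies:
--         if 2400 <= freq <= 2500:
--             bands['2.4GHz'] += 1
--         elif 5000 <= freq <= 6000:
--             bands['5GHz'] += 1
--         else:
--             bands['other'] += 1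
--
--     return bands
-- ===== SOURCE B (Python) =====
-- def _analyze_frequency_bands(frequencies):
--     """Analyze WiFi frequency band distribution"""
--     c24 = sum(1 for f in frequencies if 2400 <= f <= 2500)
--     c5 = sum(1 for f in frequencies if 5000 <= f <= 6000)
--     return {'2.4GHz': c24, '5GHz': c5, 'other': len(frequencies) - c24 - c5}
-- ===== Notes on version B (the rewrite author's own statement) =====
-- stated objective: alternative
-- what changed: Replaces the single elif-chain loop over a mutable dict with two independent counting passes (one per band) and computes 'other' as the complement len - c24 - c5.
import Mathlib
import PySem

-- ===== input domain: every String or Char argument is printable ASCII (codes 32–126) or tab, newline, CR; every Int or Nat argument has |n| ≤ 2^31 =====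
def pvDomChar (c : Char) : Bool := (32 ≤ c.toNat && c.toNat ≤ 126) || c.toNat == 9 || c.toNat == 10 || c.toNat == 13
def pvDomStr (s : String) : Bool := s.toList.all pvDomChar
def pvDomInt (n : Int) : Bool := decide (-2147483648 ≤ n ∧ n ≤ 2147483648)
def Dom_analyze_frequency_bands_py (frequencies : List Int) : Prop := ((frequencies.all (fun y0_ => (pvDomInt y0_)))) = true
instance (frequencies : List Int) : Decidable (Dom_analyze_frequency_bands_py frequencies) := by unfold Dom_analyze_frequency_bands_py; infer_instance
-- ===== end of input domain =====

-- B replaces A's single elif-chain loop over a mutable dict by two independent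
-- counting passes plus a complement for 'other' (alternative decomposition, same cost).

-- ===== PORT A =====
-- one loop over frequencies, incrementing one of three dict counters per element
def analyze_frequency_bands_py (frequencies : List Int) : List (String × Int) :=
  (frequencies.foldl
    (fun bands freq =>
      if 2400 ≤ freq ∧ freq ≤ 2500 then bands.modify "2.4GHz" 0 (· + 1)
      else if 5000 ≤ freq ∧ freq ≤ 6000 then bands.modify "5GHz" 0 (· + 1)
      else bands.modify "other" 0 (· + 1))
    (PySem.Dict.ofList [("2.4GHz", (0 : Int)), ("5GHz", 0), ("other", 0)])).items

-- ===== PORT B =====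
-- two independent counting passes; 'other' is the complement
def analyze_frequency_bands_py_alt (frequencies : List Int) : List (String × Int) :=
  let c24 : Int := frequencies.countP (fun f => decide (2400 ≤ f) && decide (f ≤ 2500))
  let c5 : Int := frequencies.countP (fun f => decide (5000 ≤ f) && decide (f ≤ 6000))
  [("2.4GHz", c24), ("5GHz", c5), ("other", (frequencies.length : Int) - c24 - c5)]

-- ===== PRECONDITION & SPEC =====
def Spec_analyze_frequency_bands_py (frequencies : List Int) (out : List (String × Int)) : Prop := out = analyze_frequency_bands_py_alt frequencies
instance (frequencies : List Int) (out : List (String × Int)) : Decidable (Spec_analyze_frequency_bands_py frequencies out) := by unfold Spec_analyze_frequency_bands_py; infer_instance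

-- ===== CLAIM (what is proved, stated in full; the proofs are below) =====
def Claim_equal_analyze_frequency_bands_py : Prop := ∀ (frequencies : List Int), Dom_analyze_frequency_bands_py frequencies → Spec_analyze_frequency_bands_py frequencies (analyze_frequency_bands_py frequencies)

-- ===== LEMMAS AND PROOFS =====

-- loop invariant for A: folding from counters (a, b, c) adds the per-band counts;
-- the third slot ends at c + (length - c24 - c5) because every element hits exactly one branch
theorem pv_loop (l : List Int) (a b c : Int) :
    l.foldl
      (fun bands freq =>
        if 2400 ≤ freq ∧ freq ≤ 2500 then bands.modify "2.4GHz" 0 (· + 1)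
        else if 5000 ≤ freq ∧ freq ≤ 6000 then bands.modify "5GHz" 0 (· + 1)
        else bands.modify "other" 0 (· + 1))
      (PySem.Dict.mk [("2.4GHz", a), ("5GHz", b), ("other", c)]) =
    PySem.Dict.mk [("2.4GHz", a + (l.countP (fun f => decide (2400 ≤ f) && decide (f ≤ 2500)) : Int)),
                   ("5GHz", b + (l.countP (fun f => decide (5000 ≤ f) && decide (f ≤ 6000)) : Int)),
                   ("other", c + ((l.length : Int)
                      - (l.countP (fun f => decide (2400 ≤ f) && decide (f ≤ 2500)) : Int)
                      - (l.countP (fun f => decide (5000 ≤ f) && decide (f ≤ 6000)) : Int)))] := by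
  induction l generalizing a b c with
  | nil => simp
  | cons x t ih =>
    by_cases h1 : 2400 ≤ x ∧ x ≤ 2500
    · have hp : (decide (2400 ≤ x) && decide (x ≤ 2500)) = true := by simp; omega
      have hq : (decide (5000 ≤ x) && decide (x ≤ 6000)) = false := by simp; omega
      simp only [List.foldl_cons, if_pos h1]
      have hm : (PySem.Dict.mk [("2.4GHz", a), ("5GHz", b), ("other", c)]).modify "2.4GHz" 0 (· + 1)
          = PySem.Dict.mk [("2.4GHz", a + 1), ("5GHz", b), ("other", c)] := by
        simp [PySem.Dict.modify, PySem.Dict.contains, PySem.Dict.insert, PySem.Dict.getD,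
          PySem.Dict.get?]
      rw [hm, ih]
      simp only [List.countP_cons, hp, hq, Bool.false_eq_true, if_false, if_true,
        List.length_cons, PySem.Dict.mk.injEq, List.cons.injEq, Prod.mk.injEq,
        true_and, and_true]
      push_cast
      omega
    · simp only [List.foldl_cons, if_neg h1]
      by_cases h2 : 5000 ≤ x ∧ x ≤ 6000
      · have hp : (decide (2400 ≤ x) && decide (x ≤ 2500)) = false := by simp; omega
        have hq : (decide (5000 ≤ x) && decide (x ≤ 6000)) = true := by simp; omega
        simp only [if_pos h2]
        have hm : (PySem.Dict.mk [("2.4GHz", a), ("5GHz", b), ("other", c)]).modify "5GHz" 0 (· + 1)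
            = PySem.Dict.mk [("2.4GHz", a), ("5GHz", b + 1), ("other", c)] := by
          simp [PySem.Dict.modify, PySem.Dict.contains, PySem.Dict.insert, PySem.Dict.getD,
            PySem.Dict.get?]
        rw [hm, ih]
        simp only [List.countP_cons, hp, hq, Bool.false_eq_true, if_false, if_true,
          List.length_cons, PySem.Dict.mk.injEq, List.cons.injEq, Prod.mk.injEq,
          true_and, and_true]
        push_cast
        omega
      · have hp : (decide (2400 ≤ x) && decide (x ≤ 2500)) = false := by simp; omega
        have hq : (decide (5000 ≤ x) && decide (x ≤ 6000)) = false := by simp; omega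
        simp only [if_neg h2]
        have hm : (PySem.Dict.mk [("2.4GHz", a), ("5GHz", b), ("other", c)]).modify "other" 0 (· + 1)
            = PySem.Dict.mk [("2.4GHz", a), ("5GHz", b), ("other", c + 1)] := by
          simp [PySem.Dict.modify, PySem.Dict.contains, PySem.Dict.insert, PySem.Dict.getD,
            PySem.Dict.get?]
        rw [hm, ih]
        simp only [List.countP_cons, hp, hq, Bool.false_eq_true, if_false, if_true,
          List.length_cons, PySem.Dict.mk.injEq, List.cons.injEq, Prod.mk.injEq,
          true_and, and_true]
        push_cast
        omega

-- ===== VERDICT (by name: the statement is the Claim_ definition above) =====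
theorem analyze_frequency_bands_py_spec : Claim_equal_analyze_frequency_bands_py := by
  intro frequencies _
  show _ = _
  unfold analyze_frequency_bands_py analyze_frequency_bands_py_alt
  have h0 : PySem.Dict.ofList [("2.4GHz", (0 : Int)), ("5GHz", 0), ("other", 0)]
      = PySem.Dict.mk [("2.4GHz", (0 : Int)), ("5GHz", 0), ("other", 0)] := by decide
  rw [h0, pv_loop]
  simp
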